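-- pv_equiv track=rewrite | github.com/mmistroni/Codility | src/peaks.py | peaks_in_slices
-- ===== SOURCE A (Python) =====
-- def peaks_in_slices(peaks, divs, A):
--     maxdivs = 0
--     slists = []
--     for subListLength in divs:
--         if subListLength == 1:
--             slists = [A]
--         else:
--             slists = [A[i:i + subListLength] for i in range(0, len(A), subListLength)]
--         peaksCount = 0
--         for sublist in slists:
--             uniques = set(sublist)
--             checks = set(sublist)-set(peaks)
--             if len(checks) < len(uniques):
--                 peaksCount +=1
--         if peaksCount == len(slists):
--             maxdivs = max(maxdivs, peaksCount)
--     return maxdivs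
-- ===== SOURCE B (Python) =====
-- def peaks_in_slices(peaks, divs, A):
--     n = len(A)
--     pk = set(peaks)
--     # prefix counts: pref[i] = number of peak values among A[:i]
--     pref = [0]
--     c = 0
--     for x in A:
--         if x in pk:
--             c += 1
--         pref.append(c)
--     best = 0
--     for d in divs:
--         if d == 1:
--             if c > 0:
--                 best = max(best, 1)
--         elif d > 1:
--             blocks = -(-n // d)
--             if all(pref[min(n, (j + 1) * d)] > pref[j * d] for j in range(blocks)):
--                 best = max(best, blocks)
--     return best
-- ===== Notes on version B (the rewrite author's own statement) =====
-- stated objective: faster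
-- what changed: B precomputes the peak set and a prefix-count array once and tests each block with two O(1) prefix lookups (block count by ceiling division), instead of A re-slicing the array and building per-chunk sets plus a set difference against the peak list for every divisor.
import Mathlib
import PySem

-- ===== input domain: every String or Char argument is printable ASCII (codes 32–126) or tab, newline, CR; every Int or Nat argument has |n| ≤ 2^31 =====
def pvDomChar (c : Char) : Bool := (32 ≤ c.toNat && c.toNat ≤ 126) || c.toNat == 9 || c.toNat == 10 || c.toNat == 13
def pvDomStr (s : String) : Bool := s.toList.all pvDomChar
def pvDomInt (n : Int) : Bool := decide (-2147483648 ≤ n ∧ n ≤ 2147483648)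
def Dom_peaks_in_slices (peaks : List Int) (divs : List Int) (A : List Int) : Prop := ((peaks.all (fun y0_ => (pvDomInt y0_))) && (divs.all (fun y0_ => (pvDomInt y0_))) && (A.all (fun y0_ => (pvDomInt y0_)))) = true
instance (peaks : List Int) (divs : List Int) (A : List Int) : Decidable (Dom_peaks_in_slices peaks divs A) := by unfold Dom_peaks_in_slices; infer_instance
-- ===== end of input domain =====

-- B replaces A's per-divisor re-chunking with set operations by one precomputed
-- peak-prefix-count array, checking each block by two prefix lookups (objective: faster).

-- ===== PORT A =====
-- loop body of A's 'for subListLength in divs' loop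
def pvStepA (peaks : List Int) (A : List Int) (maxdivs : Int) (subListLength : Int) : Int :=
  let slists : List (List Int) :=
    if subListLength == 1 then [A]
    else (PySem.List.pyRange 0 (A.length : Int) subListLength).map
           (fun i => PySem.List.slice A (some i) (some (i + subListLength)))
  let peaksCount : Int := slists.foldl (fun peaksCount sublist =>
    let uniques : PySem.Set Int := PySem.Set.ofList sublist
    let checks : PySem.Set Int := PySem.Set.diff (PySem.Set.ofList sublist) (PySem.Set.ofList peaks)
    if PySem.Set.len checks < PySem.Set.len uniques then peaksCount + 1 else peaksCount) 0
  if peaksCount == (slists.length : Int) then max maxdivs peaksCount else maxdivs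

def peaks_in_slices (peaks : List Int) (divs : List Int) (A : List Int) : Int :=
  divs.foldl (pvStepA peaks A) 0

-- ===== PORT B =====
-- builds B's prefix-count list: returns (pref, c) with pref[i] = #peaks among A[:i], c = pref[len A]
def pvPref (pk : PySem.Set Int) (A : List Int) : List Int × Int :=
  A.foldl (fun st x =>
    let c := if PySem.Set.contains pk x then st.2 + 1 else st.2
    (st.1 ++ [c], c)) ([0], 0)

-- loop body of B's 'for d in divs' loop
def pvStepB (pref : List Int) (c : Int) (n : Int) (best : Int) (d : Int) : Int :=
  if d == 1 then
    if 0 < c then max best 1 else best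
  else if 1 < d then
    let blocks : Int := -(PySem.Int.floordiv (-n) d)
    if (PySem.List.pyRange 0 blocks 1).all (fun j =>
        decide (PySem.List.pyGetD pref (j * d) 0 < PySem.List.pyGetD pref (min n ((j + 1) * d)) 0))
    then max best blocks else best
  else best

def peaks_in_slices_alt (peaks : List Int) (divs : List Int) (A : List Int) : Int :=
  let n : Int := (A.length : Int)
  let pk : PySem.Set Int := PySem.Set.ofList peaks
  let pc := pvPref pk A
  divs.foldl (pvStepB pc.1 pc.2 n) 0

-- ===== PRECONDITION & SPEC =====
-- Pre_ excludes divisor lists containing 0, on which Python A raises ValueError (range() step 0).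
def Pre_peaks_in_slices (peaks : List Int) (divs : List Int) (A : List Int) : Prop :=
  (0 : Int) ∉ divs
instance (peaks : List Int) (divs : List Int) (A : List Int) : Decidable (Pre_peaks_in_slices peaks divs A) := by unfold Pre_peaks_in_slices; infer_instance

def pvWitness_peaks_in_slices : List Int × List Int × List Int := ([3, 5], [1, 2, 3], [1, 3, 2, 5, 4, 3])

def Spec_peaks_in_slices (peaks : List Int) (divs : List Int) (A : List Int) (out : Int) : Prop := out = peaks_in_slices_alt peaks divs A
instance (peaks : List Int) (divs : List Int) (A : List Int) (out : Int) : Decidable (Spec_peaks_in_slices peaks divs A out) := by unfold Spec_peaks_in_slices; infer_instance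

-- ===== CLAIM (what is proved, stated in full; the proofs are below) =====
def Claim_equal_peaks_in_slices : Prop := ∀ (peaks : List Int) (divs : List Int) (A : List Int), Dom_peaks_in_slices peaks divs A → Pre_peaks_in_slices peaks divs A → Spec_peaks_in_slices peaks divs A (peaks_in_slices peaks divs A)
-- ===== LEMMAS AND PROOFS =====

def pvP (peaks : List Int) : Int → Bool := fun x => decide (x ∈ peaks)

theorem pvContains_eq (peaks : List Int) (x : Int) :
    PySem.Set.contains (PySem.Set.ofList peaks) x = pvP peaks x := by
  simp [pvP, PySem.Set.mem_ofList]

theorem pvChunkTest (peaks s : List Int) :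
    (PySem.Set.len (PySem.Set.diff (PySem.Set.ofList s) (PySem.Set.ofList peaks)) <
      PySem.Set.len (PySem.Set.ofList s)) ↔ 0 < s.countP (pvP peaks) := by
  simp only [PySem.Set.len, PySem.Set.diff, Nat.cast_lt]
  rw [List.length_filter_lt_length_iff_exists, List.countP_pos_iff]
  constructor
  · rintro ⟨x, hx, hq⟩
    refine ⟨x, (PySem.Set.mem_ofList s x).mp hx, ?_⟩
    simpa [pvContains_eq, pvP] using hq
  · rintro ⟨x, hx, hq⟩
    refine ⟨x, (PySem.Set.mem_ofList s x).mpr hx, ?_⟩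
    simpa [pvContains_eq, pvP] using hq

theorem pvPref_eq (peaks A : List Int) :
    pvPref (PySem.Set.ofList peaks) A =
      ((List.range (A.length + 1)).map (fun k => ((A.take k).countP (pvP peaks) : Int)),
       (A.countP (pvP peaks) : Int)) := by
  induction A using List.reverseRecOn with
  | nil => simp [pvPref]
  | append_singleton A x ih =>
    unfold pvPref at ih ⊢
    rw [List.foldl_append, ih]
    simp only [List.foldl_cons, List.foldl_nil]
    have hc : (if PySem.Set.contains (PySem.Set.ofList peaks) x
        then ((A.countP (pvP peaks) : Int)) + 1 else ((A.countP (pvP peaks) : Int)))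
        = (((A ++ [x]).countP (pvP peaks) : Int)) := by
      rw [pvContains_eq]
      by_cases h : pvP peaks x = true
      · simp [h, List.countP_append, List.countP_cons, List.countP_nil]
      · have h' : pvP peaks x = false := by simpa using h
        simp [h', List.countP_append, List.countP_cons, List.countP_nil]
    rw [Prod.mk.injEq]
    have hmap : List.map (fun k => (((A ++ [x]).take k).countP (pvP peaks) : Int))
        (List.range (A.length + 1 + 1))
        = List.map (fun k => ((A.take k).countP (pvP peaks) : Int)) (List.range (A.length + 1))
          ++ [(((A ++ [x]).countP (pvP peaks)) : Int)] := by
      rw [List.range_succ, List.map_append, List.map_singleton]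
      congr 1
      · apply List.map_congr_left
        intro k hk
        rw [List.mem_range] at hk
        rw [List.take_append_of_le_length (by omega)]
      · rw [List.take_of_length_le (by simp)]
    refine ⟨?_, ?_⟩
    · show _ ++ [_] = _
      rw [show (A ++ [x]).length = A.length + 1 by simp, hmap, hc]
    · show (if _ then _ else _) = _
      exact hc
-- ceiling-division agreement: B's -( (-n) // d ) equals pyRange_of_pos's count

theorem pvBlocks (n d : Int) (hn : 0 ≤ n) (hd : 0 < d) :
    -(PySem.Int.floordiv (-n) d) =
      (((if 0 < n then ((n - 0 + d - 1) / d).toNat else 0) : Nat) : Int) := by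
  rw [PySem.Int.neg_floordiv_neg_eq_iff_of_pos hd]
  split_ifs with h
  · have h1 : 0 ≤ n - 0 + d - 1 := by omega
    have hq : 0 ≤ (n - 0 + d - 1) / d := Int.ediv_nonneg h1 (le_of_lt hd)
    rw [Int.toNat_of_nonneg hq]
    have heq := Int.mul_ediv_add_emod (n - 0 + d - 1) d
    have h2 := Int.emod_nonneg (n - 0 + d - 1) (ne_of_gt hd)
    have h3 := Int.emod_lt_of_pos (n - 0 + d - 1) hd
    constructor <;> nlinarith
  · have : n = 0 := by omega
    subst this
    simp
    omega

-- a block contains a peak iff its two prefix counts differ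

theorem pvBlock (peaks A : List Int) (dn k : Nat) :
    (0 < ((A.drop (dn * k)).take dn).countP (pvP peaks)) ↔
      (((A.take (dn * k)).countP (pvP peaks) : Int) <
       ((A.take (min A.length (dn * k + dn))).countP (pvP peaks) : Int)) := by
  have hmin : A.take (min A.length (dn * k + dn)) = A.take (dn * k + dn) := by
    rcases le_total (dn * k + dn) A.length with h | h
    · rw [min_eq_right h]
    · rw [min_eq_left h, List.take_length, List.take_of_length_le h]
  rw [hmin, List.take_add, List.countP_append]
  push_cast
  omega

theorem pvAll_congr_mem {α : Type} (l : List α) (f g : α → Bool)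
    (h : ∀ x ∈ l, f x = g x) : l.all f = l.all g := by
  induction l with
  | nil => rfl
  | cons a t ih =>
    simp only [List.all_cons, h a (List.mem_cons_self),
      ih (fun x hx => h x (List.mem_cons_of_mem _ hx))]

theorem pvStep_eq (peaks A : List Int) (acc d : Int) (hd : d ≠ 0) (hacc : 0 ≤ acc) :
    pvStepA peaks A acc d =
      pvStepB ((List.range (A.length + 1)).map (fun k => ((A.take k).countP (pvP peaks) : Int)))
        ((A.countP (pvP peaks) : Int)) (A.length : Int) acc d := by
  by_cases hd1 : d = 1
  · subst hd1
    by_cases h : 0 < A.countP (pvP peaks)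
    · have hA := (pvChunkTest peaks A).mpr h
      have hA' : (PySem.Set.diff (PySem.Set.ofList A) (PySem.Set.ofList peaks)).length <
          (PySem.Set.ofList A).length := by
        simpa [PySem.Set.len, Nat.cast_lt] using hA
      simp [pvStepA, pvStepB, hA', h]
    · have hA : ¬ (PySem.Set.len (PySem.Set.diff (PySem.Set.ofList A) (PySem.Set.ofList peaks)) <
          PySem.Set.len (PySem.Set.ofList A)) := fun hc => h ((pvChunkTest peaks A).mp hc)
      have hA' : ¬ ((PySem.Set.diff (PySem.Set.ofList A) (PySem.Set.ofList peaks)).length <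
          (PySem.Set.ofList A).length) := by
        intro hc
        exact hA (by simpa [PySem.Set.len, Nat.cast_lt] using hc)
      simp [pvStepA, pvStepB, hA', h]
  · have hbeq1 : (d == (1:Int)) = false := by simp [hd1]
    by_cases hd2 : 1 < d
    · -- main case: d ≥ 2
      have hd0 : 0 < d := by omega
      have hdd : d = (d.toNat : Int) := (Int.toNat_of_nonneg (le_of_lt hd0)).symm
      set dn := d.toNat with hdn
      set C : Nat := (if (0:Int) < (A.length:Int)
        then (((A.length:Int) - 0 + d - 1) / d).toNat else 0) with hCdef
      have hrange : PySem.List.pyRange 0 (A.length:Int) d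
          = (List.range C).map (fun k : Nat => 0 + d * (k:Int)) :=
        PySem.List.pyRange_of_pos 0 (A.length:Int) hd0
      have hblocks : -(PySem.Int.floordiv (-(A.length:Int)) d) = (C:Int) :=
        pvBlocks (A.length:Int) d (Int.natCast_nonneg _) hd0
      have hbr := (PySem.Int.neg_floordiv_neg_eq_iff_of_pos hd0).mp hblocks
      have hkb : ∀ k : Nat, k < C → dn * k < A.length := by
        intro k hk
        have h1 : (k:Int) ≤ (C:Int) - 1 := by
          have : (k:Int) < (C:Int) := by exact_mod_cast hk
          omega
        have h2 : (k:Int) * d ≤ ((C:Int) - 1) * d :=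
          mul_le_mul_of_nonneg_right h1 (le_of_lt hd0)
        have : ((dn * k : Nat) : Int) < (A.length : Int) := by
          push_cast
          calc (dn:Int) * k = (k:Int) * d := by rw [← hdd]; ring
          _ ≤ ((C:Int) - 1) * d := h2
          _ < (A.length:Int) := hbr.1
        exact_mod_cast this
      -- abbreviations
      set pref := (List.range (A.length + 1)).map
        (fun k => ((A.take k).countP (pvP peaks) : Int)) with hpref
      set qd : List Int → Bool := fun sublist =>
        decide (PySem.Set.len (PySem.Set.diff (PySem.Set.ofList sublist) (PySem.Set.ofList peaks)) <
          PySem.Set.len (PySem.Set.ofList sublist)) with hqd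
      set slists := (PySem.List.pyRange 0 (A.length:Int) d).map
        (fun i => PySem.List.slice A (some i) (some (i + d))) with hslists
      have hlen : slists.length = C := by
        rw [hslists, hrange, List.length_map, List.length_map, List.length_range]
      have hfold : slists.foldl (fun peaksCount sublist =>
          if PySem.Set.len (PySem.Set.diff (PySem.Set.ofList sublist) (PySem.Set.ofList peaks)) <
              PySem.Set.len (PySem.Set.ofList sublist)
          then peaksCount + 1 else peaksCount) (0:Int) = (0:Int) + (slists.countP qd : Int) := by
        exact PySem.List.foldl_ite_add_one _ slists 0
      have hsame : slists.all qd = (PySem.List.pyRange 0 ((C:Int)) 1).all (fun j =>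
          decide (PySem.List.pyGetD pref (j * d) 0 <
            PySem.List.pyGetD pref (min (A.length:Int) ((j + 1) * d)) 0)) := by
        rw [hslists, hrange, List.map_map, List.all_map, PySem.List.pyRange_one, List.all_map]
        have hCtn : ((C:Int) - 0).toNat = C := by omega
        rw [hCtn]
        apply pvAll_congr_mem
        intro k hk
        rw [List.mem_range] at hk
        show qd (PySem.List.slice A (some (0 + d * (k:Int))) (some (0 + d * (k:Int) + d))) = _
        have e1 : (0:Int) + d * (k:Int) = ((dn * k : Nat) : Int) := by push_cast [← hdd]; ring
        have e4 : ((dn * k : Nat) : Int) + d = ((dn * k : Nat) : Int) + ((dn:Nat):Int) := by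
          rw [← hdd]
        have e2 : ((0:Int) + (k:Int)) * d = ((dn * k : Nat) : Int) := by push_cast [← hdd]; ring
        have e3 : min ((A.length:Int)) ((0 + (k:Int) + 1) * d)
            = ((min A.length (dn * k + dn) : Nat) : Int) := by
          push_cast [← hdd]
          congr 1
          ring
        rw [e1, e4, PySem.List.slice_natCast_add]
        show _ = decide (PySem.List.pyGetD pref ((0 + (k:Int)) * d) 0 <
            PySem.List.pyGetD pref (min (A.length:Int) ((0 + (k:Int) + 1) * d)) 0)
        rw [e2, e3, PySem.List.pyGetD_natCast, PySem.List.pyGetD_natCast, hpref,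
          PySem.List.getD_map_range _ _ _ _ (by have := hkb k hk; omega),
          PySem.List.getD_map_range _ _ _ _ (by omega)]
        exact decide_eq_decide.mpr ((pvChunkTest peaks _).trans (pvBlock peaks A dn k))
      -- now reduce both sides
      simp only [pvStepA, pvStepB, hbeq1, Bool.false_eq_true, if_false, hd2, if_true, hblocks]
      rw [hfold, ← hsame]
      by_cases hall : slists.all qd = true
      · have hcnt : slists.countP qd = slists.length := List.countP_eq_length.mpr
          (by intro a ha; exact List.all_eq_true.mp hall a ha)
        have hlen2 : (PySem.List.pyRange 0 (A.length:Int) d).length = C := by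
          rw [hrange]; simp
        simp [hall, hcnt, hlen, hlen2]
      · have hne : slists.countP qd ≠ slists.length := by
          intro hcnt
          exact hall (List.all_eq_true.mpr (List.countP_eq_length.mp hcnt))
        have hb : ¬ ((0:Int) + (slists.countP qd : Int) = (slists.length : Int)) := by omega
        have hlen2 : (PySem.List.pyRange 0 (A.length:Int) d).length = C := by
          rw [hrange]; simp
        rw [Bool.not_eq_true] at hall
        simp [hall, hlen2]
        intro hcc
        exact absurd (hlen ▸ hcc : slists.countP qd = slists.length) hne
    · -- d < 0
      have hneg : d < 0 := by omega
      have hr : PySem.List.pyRange 0 (A.length:Int) d = [] := by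
        have h1 : ¬ (0:Int) < d := by omega
        have h2 : ¬ ((A.length:Int) < 0) := by omega
        simp [PySem.List.pyRange, hd, h1, h2]
      have hbeq2 : ¬ (1:Int) < d := hd2
      simp [pvStepA, pvStepB, hr, hbeq1, hbeq2, max_eq_left hacc]

theorem pvStepA_nonneg (peaks A : List Int) (acc d : Int) (hacc : 0 ≤ acc) :
    0 ≤ pvStepA peaks A acc d := by
  unfold pvStepA
  dsimp only
  split <;> split <;>
    first
      | exact le_trans hacc (le_max_left _ _)
      | exact hacc

-- ===== VERDICT (by name: the statement is the Claim_ definition above) =====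
theorem peaks_in_slices_spec : Claim_equal_peaks_in_slices := by
  intro peaks divs A _ hpre
  unfold Spec_peaks_in_slices peaks_in_slices peaks_in_slices_alt
  dsimp only
  rw [pvPref_eq]
  have main : ∀ (l : List Int) (acc : Int), (0:Int) ∉ l → 0 ≤ acc →
      l.foldl (pvStepA peaks A) acc =
      l.foldl (pvStepB ((List.range (A.length + 1)).map
          (fun k => ((A.take k).countP (pvP peaks) : Int)))
        ((A.countP (pvP peaks) : Int)) (A.length : Int)) acc := by
    intro l
    induction l with
    | nil => intro acc _ _; rfl
    | cons a t ih =>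
      intro acc hmem hacc
      have ha : a ≠ 0 := fun h => hmem (h ▸ List.mem_cons_self)
      simp only [List.foldl_cons]
      rw [← pvStep_eq peaks A acc a ha hacc]
      exact ih _ (fun h => hmem (List.mem_cons_of_mem _ h)) (pvStepA_nonneg peaks A acc a hacc)
  exact main divs 0 hpre le_rfl
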